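-- pv_equiv track=rewrite | github.com/ktheu/Programmierwettbewerbe | bwinf1/drehfreudig/klammer.py | klammernToGraph
-- ===== SOURCE A (Python) =====
-- def klammernToGraph(s):
--     G = {x:[] for x in range(1,len(s)//2 + 1)}
--     stack = []
--     zaehl = 0
--     for c in s:
--         if c == '(':
--             zaehl += 1
--             if stack:     # wenn nicht die Wurzel betrachtet wird
--                 parent = stack[-1]
--                 G[parent].append(zaehl)
--             stack.append(zaehl)
--         elif c == ')':
--             stack.pop()
--     return G
-- ===== SOURCE B (Python) =====
-- def klammernToGraph(s):
--     G = {x: [] for x in range(1, len(s) // 2 + 1)}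
--
--     def parse(i, parent, z):
--         # parse the children of `parent` from position i on; stops after the
--         # ')' that closes `parent` (or at the end of the string); returns (i, z)
--         while i < len(s):
--             c = s[i]
--             i += 1
--             if c == '(':
--                 z += 1
--                 if parent:
--                     G[parent].append(z)
--                 i, z = parse(i, z, z)
--             elif c == ')':
--                 return i, z
--         return i, z
--
--     parse(0, 0, 0)
--     return G
-- ===== Notes on version B (the rewrite author's own statement) =====
-- stated objective: alternative
-- what changed: The explicit stack loop is replaced by a recursive descent parser: the current parent is passed down as an argument and the call stack plays the role of A's id stack.
-- outside the precondition, e.g. on klammernToGraph('('): A returns {}, B returns {}; on klammernToGraph('(('): A returns {1: [2]}, B returns {1: [2]}; on klammernToGraph('((()'): A returns {1: [2], 2: [3]}, B returns {1: [2], 2: [3]}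
import Mathlib
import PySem

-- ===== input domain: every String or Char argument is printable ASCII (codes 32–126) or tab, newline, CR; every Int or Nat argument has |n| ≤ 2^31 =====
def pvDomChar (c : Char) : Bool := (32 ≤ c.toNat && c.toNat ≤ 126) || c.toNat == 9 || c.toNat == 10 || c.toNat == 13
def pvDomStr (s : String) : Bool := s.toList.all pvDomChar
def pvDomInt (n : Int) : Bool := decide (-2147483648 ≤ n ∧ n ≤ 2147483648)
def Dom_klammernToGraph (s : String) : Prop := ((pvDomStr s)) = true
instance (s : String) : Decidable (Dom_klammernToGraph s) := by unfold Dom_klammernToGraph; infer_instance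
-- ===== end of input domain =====

-- B replaces A's explicit id-stack loop by a recursive-descent parser (the parent id is
-- passed down, the call stack replaces A's stack); alternative decomposition, same cost.

-- ===== PORT A =====
-- one step of A's for-loop; state = (G, stack (head = top), zaehl); none = a raise happened
def stepA_klammern (st : Option (PySem.Dict Int (List Int) × List Int × Int)) (c : Char) :
    Option (PySem.Dict Int (List Int) × List Int × Int) :=
  match st with
  | none => none
  | some (G, stk, z) =>
    if c = '(' then
      let z1 := z + 1
      match stk with
      | [] => some (G, [z1], z1)
      | p :: _ =>
        match G.get? p with
        | none => none                                   -- KeyError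
        | some l => some (G.insert p (l ++ [z1]), z1 :: stk, z1)
    else if c = ')' then
      match stk with
      | [] => none                                       -- IndexError (pop from empty stack)
      | _ :: t => some (G, t, z)
    else some (G, stk, z)

def klammernToGraph (s : String) : List (Int × List Int) :=
  let cs := s.toList
  let G0 : PySem.Dict Int (List Int) :=
    (PySem.List.pyRange 1 (PySem.Int.floordiv (cs.length : Int) 2 + 1) 1).foldl
      (fun d x => d.insert x ([] : List Int)) PySem.Dict.empty
  match cs.foldl stepA_klammern (some (G0, ([] : List Int), (0 : Int))) with
  | some (G, _, _) => G.items
  | none => []                                           -- unreachable under Pre_ (A raises there)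

-- ===== PORT B =====
-- B's recursive `parse(i, parent, z)`: consumes characters until the ')' closing `parent`
-- (or the end of the string); returns (remaining characters, G, z). fuel = |s|+1 is always
-- enough, so the fuel case never changes the computed value.
def parseB_klammern : Nat → Int → List Char → PySem.Dict Int (List Int) → Int →
    List Char × PySem.Dict Int (List Int) × Int
  | 0, _, cs, G, z => (cs, G, z)
  | fuel + 1, parent, cs, G, z =>
    match cs with
    | [] => ([], G, z)
    | c :: rest =>
      if c = '(' then
        let z1 := z + 1
        let G1 := if parent ≠ 0 then
            (match G.get? parent with
             | some l => G.insert parent (l ++ [z1])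
             | none => G)                                -- Python raises KeyError here; outside Pre_
          else G
        let r1 := parseB_klammern fuel z1 rest G1 z1
        parseB_klammern fuel parent r1.1 r1.2.1 r1.2.2
      else if c = ')' then (rest, G, z)
      else parseB_klammern fuel parent rest G z

def klammernToGraph_alt (s : String) : List (Int × List Int) :=
  let cs := s.toList
  let G0 : PySem.Dict Int (List Int) :=
    (PySem.List.pyRange 1 (PySem.Int.floordiv (cs.length : Int) 2 + 1) 1).foldl
      (fun d x => d.insert x ([] : List Int)) PySem.Dict.empty
  (parseB_klammern (cs.length + 1) 0 cs G0 0).2.1.items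

-- ===== PRECONDITION & SPEC =====
-- Pre_ excludes the inputs where A raises (a ')' with no open '(' before it → IndexError;
-- more '(' than len(s)//2 dict keys → KeyError).  The bound `count '(' ≤ len/2` also excludes
-- some unbalanced strings with unclosed parentheses on which A happens to return (e.g. "((",
-- whose later parents stay within the keys); A and B agree on those too (see claim cites).
def Pre_klammernToGraph (s : String) : Prop :=
  (∀ p ∈ s.toList.inits, p.count ')' ≤ p.count '(') ∧
  s.toList.count '(' ≤ s.toList.length / 2
instance (s : String) : Decidable (Pre_klammernToGraph s) := by
  unfold Pre_klammernToGraph; infer_instance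

def pvWitness_klammernToGraph : String := "(()())"

def Spec_klammernToGraph (s : String) (out : List (Int × List Int)) : Prop := out = klammernToGraph_alt s
instance (s : String) (out : List (Int × List Int)) : Decidable (Spec_klammernToGraph s out) := by unfold Spec_klammernToGraph; infer_instance

-- ===== CLAIM (what is proved, stated in full; the proofs are below) =====
def Claim_equal_klammernToGraph : Prop := ∀ (s : String), Dom_klammernToGraph s → Pre_klammernToGraph s → Spec_klammernToGraph s (klammernToGraph s)

-- ===== LEMMAS AND PROOFS =====

-- the dict update B performs on an open parenthesis (no-op for the root parent 0)
def childDict (G : PySem.Dict Int (List Int)) (p z1 : Int) : PySem.Dict Int (List Int) :=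
  if p ≠ 0 then
    (match G.get? p with
     | some l => G.insert p (l ++ [z1])
     | none => G)
  else G

theorem parseB_step_open (f : Nat) (p : Int) (rest : List Char) (G : PySem.Dict Int (List Int)) (z : Int) :
    parseB_klammern (f+1) p ('('::rest) G z
      = parseB_klammern f p
          (parseB_klammern f (z+1) rest (childDict G p (z+1)) (z+1)).1
          (parseB_klammern f (z+1) rest (childDict G p (z+1)) (z+1)).2.1
          (parseB_klammern f (z+1) rest (childDict G p (z+1)) (z+1)).2.2 := rfl

theorem parseB_step_close (f : Nat) (p : Int) (rest : List Char) (G : PySem.Dict Int (List Int)) (z : Int) :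
    parseB_klammern (f+1) p (')'::rest) G z = (rest, G, z) := rfl

theorem parseB_step_other (f : Nat) (p : Int) (c : Char) (rest : List Char)
    (G : PySem.Dict Int (List Int)) (z : Int) (h1 : ¬ c = '(') (h2 : ¬ c = ')') :
    parseB_klammern (f+1) p (c::rest) G z = parseB_klammern f p rest G z := by
  simp [parseB_klammern, h1, h2]

theorem parseB_nil (f : Nat) (p : Int) (G : PySem.Dict Int (List Int)) (z : Int) :
    parseB_klammern f p [] G z = ([], G, z) := by
  cases f <;> rfl

theorem keys_childDict (G : PySem.Dict Int (List Int)) (p z1 k : Int) :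
    ((childDict G p z1).get? k).isSome = (G.get? k).isSome := by
  unfold childDict
  split
  · cases h : G.get? p with
    | none => rfl
    | some l =>
      rw [PySem.Dict.get?_insert]
      by_cases hk : k = p
      · simp [hk, h]
      · simp [hk]
  · rfl

-- parseB consumes a prefix `pre`; z grows by the '(' count of `pre`; if input remains, `pre`
-- closes one more parenthesis than it opens; the key set of G is unchanged.
theorem parseB_klammern_spec (fuel : Nat) :
    ∀ (cs : List Char) (p : Int) (G : PySem.Dict Int (List Int)) (z : Int),
    cs.length < fuel →
    ∃ pre : List Char,
      cs = pre ++ (parseB_klammern fuel p cs G z).1 ∧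
      (parseB_klammern fuel p cs G z).2.2 = z + (pre.count '(' : Int) ∧
      ((parseB_klammern fuel p cs G z).1 ≠ [] → pre.count ')' = pre.count '(' + 1) ∧
      (∀ k : Int, ((parseB_klammern fuel p cs G z).2.1.get? k).isSome = (G.get? k).isSome) := by
  induction fuel with
  | zero => intro cs p G z h; omega
  | succ f ih =>
    intro cs p G z h
    match cs with
    | [] =>
      exact ⟨[], by simp [parseB_klammern]⟩
    | c :: rest =>
      by_cases hc1 : c = '('
      · subst hc1
        rw [parseB_step_open]
        have hlen : rest.length < f := by simpa using h
        obtain ⟨pre1, he1, hz1, hb1, hk1⟩ := ih rest (z+1) (childDict G p (z+1)) (z+1) hlen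
        set c1 := parseB_klammern f (z+1) rest (childDict G p (z+1)) (z+1) with hc1d
        have hlen2 : c1.1.length < f := by
          have := congrArg List.length he1; simp at this; omega
        obtain ⟨pre2, he2, hz2, hb2, hk2⟩ := ih c1.1 p c1.2.1 c1.2.2 hlen2
        refine ⟨'(' :: (pre1 ++ pre2), ?_, ?_, ?_, ?_⟩
        · rw [List.cons_append, List.append_assoc, ← he2, ← he1]
        · rw [hz2, hz1]
          simp [List.count_cons, List.count_append]
          ring
        · intro hne
          have hne1 : c1.1 ≠ [] := by
            intro h0
            rw [h0] at he2 hne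
            simp at he2
            obtain ⟨h2a, h2b⟩ := he2
            cases f with
            | zero => omega
            | succ f' => exact hne (by simp [parseB_klammern])
          have b1 := hb1 hne1
          have b2 := hb2 hne
          simp [List.count_append, b1, b2]
          omega
        · intro k
          rw [hk2 k, hk1 k]
          exact keys_childDict G p (z+1) k
      · by_cases hc2 : c = ')'
        · subst hc2
          rw [parseB_step_close]
          refine ⟨[')'], by simp, by simp, by intro _; simp, by intro k; rfl⟩
        · rw [parseB_step_other f p c rest G z hc1 hc2]
          have hlen : rest.length < f := by simpa using h
          obtain ⟨pre, he, hz, hb, hk⟩ := ih rest p G z hlen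
          refine ⟨c :: pre, ?_, ?_, ?_, ?_⟩
          · simpa using he
          · rw [hz]; simp [List.count_cons, hc1]
          · intro hne
            have := hb hne
            simp [List.count_cons, hc1, hc2, this]
          · exact hk

-- A's fold with stack p::ps equals: run B's parse(p), then continue A's fold on the rest
-- with stack ps (if the string runs out first, only the stack above ps differs).
theorem foldA_parseB_cons (fuel : Nat) :
    ∀ (cs : List Char) (p : Int) (ps : List Int) (G : PySem.Dict Int (List Int)) (z : Int),
    cs.length < fuel →
    0 < p → 0 ≤ z →
    (G.get? p).isSome →
    (∀ k : Int, z < k → k ≤ z + (cs.count '(' : Int) → (G.get? k).isSome) →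
    ∃ T : List Int,
      cs.foldl stepA_klammern (some (G, p :: ps, z)) =
        (if (parseB_klammern fuel p cs G z).1 = [] then
          some ((parseB_klammern fuel p cs G z).2.1, T ++ ps, (parseB_klammern fuel p cs G z).2.2)
         else
          (parseB_klammern fuel p cs G z).1.foldl stepA_klammern
            (some ((parseB_klammern fuel p cs G z).2.1, ps, (parseB_klammern fuel p cs G z).2.2))) := by
  induction fuel with
  | zero => intro cs p ps G z h; omega
  | succ f ih =>
    intro cs p ps G z h hp hz hpk hnew
    match cs with
    | [] =>
      exact ⟨[p], by simp [parseB_klammern]⟩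
    | c :: rest =>
      by_cases hc1 : c = '('
      · subst hc1
        obtain ⟨l, hl⟩ := Option.isSome_iff_exists.mp hpk
        have hcd : childDict G p (z+1) = G.insert p (l ++ [z+1]) := by
          unfold childDict
          rw [if_pos (by omega), hl]
        have hstepA : stepA_klammern (some (G, p :: ps, z)) '('
            = some (childDict G p (z+1), (z+1) :: p :: ps, z+1) := by
          rw [hcd]; simp [stepA_klammern, hl]
        have hlen : rest.length < f := by simpa using h
        have hcnt : ('('::rest).count '(' = rest.count '(' + 1 := by simp
        have hkc : ∀ k : Int, ((childDict G p (z+1)).get? k).isSome = (G.get? k).isSome :=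
          fun k => keys_childDict G p (z+1) k
        have hpk1 : ((childDict G p (z+1)).get? (z+1)).isSome := by
          rw [hkc]; exact hnew (z+1) (by omega) (by omega)
        have hnew1 : ∀ k : Int, z+1 < k → k ≤ z+1 + (rest.count '(' : Int) →
            ((childDict G p (z+1)).get? k).isSome := by
          intro k hk1 hk2
          rw [hkc]
          exact hnew k (by omega) (by omega)
        obtain ⟨pre1, he1, hz1, hb1, hk1⟩ := parseB_klammern_spec f rest (z+1) (childDict G p (z+1)) (z+1) hlen
        obtain ⟨T1, E1⟩ := ih rest (z+1) (p :: ps) (childDict G p (z+1)) (z+1) hlen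
          (by omega) (by omega) hpk1 hnew1
        set c1 := parseB_klammern f (z+1) rest (childDict G p (z+1)) (z+1) with hc1d
        rw [parseB_step_open, ← hc1d]
        rw [List.foldl_cons, hstepA]
        by_cases hemp : c1.1 = []
        · have hcont : parseB_klammern f p c1.1 c1.2.1 c1.2.2 = ([], c1.2.1, c1.2.2) := by
            rw [hemp, parseB_nil]
          rw [if_pos hemp] at E1
          rw [E1, hcont]
          exact ⟨T1 ++ [p], by simp⟩
        · rw [if_neg hemp] at E1
          rw [E1]
          have hlen2 : c1.1.length < f := by
            have := congrArg List.length he1; simp at this; omega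
          have hpk2 : (c1.2.1.get? p).isSome := by rw [hk1, hkc]; exact hpk
          have hcpos : (0:Int) ≤ (pre1.count '(' : Int) := by positivity
          have hz2 : 0 ≤ c1.2.2 := by omega
          have hsplit : rest.count '(' = pre1.count '(' + c1.1.count '(' := by
            conv_lhs => rw [he1]
            rw [List.count_append]
          have hnew2 : ∀ k : Int, c1.2.2 < k → k ≤ c1.2.2 + (c1.1.count '(' : Int) →
              (c1.2.1.get? k).isSome := by
            intro k hk2a hk2b
            rw [hk1, hkc]
            exact hnew k (by omega) (by omega)
          exact ih c1.1 p ps c1.2.1 c1.2.2 hlen2 hp hz2 hpk2 hnew2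
      · by_cases hc2 : c = ')'
        · subst hc2
          rw [parseB_step_close]
          have hstepA : stepA_klammern (some (G, p :: ps, z)) ')' = some (G, ps, z) := by
            simp [stepA_klammern]
          rw [List.foldl_cons, hstepA]
          by_cases hr : rest = []
          · subst hr; exact ⟨[], by simp⟩
          · exact ⟨[], by rw [if_neg hr]⟩
        · rw [parseB_step_other f p c rest G z hc1 hc2]
          have hstepA : stepA_klammern (some (G, p :: ps, z)) c = some (G, p :: ps, z) := by
            simp [stepA_klammern, hc1, hc2]
          rw [List.foldl_cons, hstepA]
          have hlen : rest.length < f := by simpa using h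
          have hcnt : (c::rest).count '(' = rest.count '(' := by simp [hc1]
          have hnew' : ∀ k : Int, z < k → k ≤ z + (rest.count '(' : Int) → (G.get? k).isSome := by
            intro k hk1 hk2
            exact hnew k hk1 (by omega)
          exact ih rest p ps G z hlen hp hz hpk hnew'

-- A's whole fold from the empty stack equals B's top-level parse(0) (prefix-balance rules
-- out the empty-stack pop; only the leftover stack of unclosed opens is unconstrained).
theorem foldA_parseB_nil (fuel : Nat) :
    ∀ (cs : List Char) (G : PySem.Dict Int (List Int)) (z : Int),
    cs.length < fuel →
    0 ≤ z →
    (∀ p ∈ cs.inits, p.count ')' ≤ p.count '(') →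
    (∀ k : Int, z < k → k ≤ z + (cs.count '(' : Int) → (G.get? k).isSome) →
    ∃ T : List Int,
      cs.foldl stepA_klammern (some (G, ([] : List Int), z)) =
        some ((parseB_klammern fuel 0 cs G z).2.1, T, (parseB_klammern fuel 0 cs G z).2.2) := by
  induction fuel with
  | zero => intro cs G z h; omega
  | succ f ih =>
    intro cs G z h hz hbal hnew
    match cs with
    | [] =>
      exact ⟨[], by simp [parseB_klammern]⟩
    | c :: rest =>
      by_cases hc1 : c = '('
      · subst hc1
        have hcd : childDict G 0 (z+1) = G := by unfold childDict; simp
        have hstepA : stepA_klammern (some (G, ([] : List Int), z)) '(' = some (G, [z+1], z+1) := by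
          simp [stepA_klammern]
        have hlen : rest.length < f := by simpa using h
        have hcnt : ('('::rest).count '(' = rest.count '(' + 1 := by simp
        have hpk1 : (G.get? (z+1)).isSome := hnew (z+1) (by omega) (by omega)
        have hnew1 : ∀ k : Int, z+1 < k → k ≤ z+1 + (rest.count '(' : Int) → (G.get? k).isSome := by
          intro k hk1 hk2
          exact hnew k (by omega) (by omega)
        obtain ⟨pre1, he1, hz1, hb1, hk1⟩ := parseB_klammern_spec f rest (z+1) G (z+1) hlen
        obtain ⟨T1, E1⟩ := foldA_parseB_cons f rest (z+1) [] G (z+1) hlen (by omega) (by omega) hpk1 hnew1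
        set c1 := parseB_klammern f (z+1) rest G (z+1) with hc1d
        rw [parseB_step_open, hcd, ← hc1d]
        rw [List.foldl_cons, hstepA]
        by_cases hemp : c1.1 = []
        · have hcont : parseB_klammern f 0 c1.1 c1.2.1 c1.2.2 = ([], c1.2.1, c1.2.2) := by
            rw [hemp, parseB_nil]
          rw [if_pos hemp] at E1
          rw [E1, hcont]
          exact ⟨T1 ++ [], rfl⟩
        · rw [if_neg hemp] at E1
          rw [E1]
          have hlen2 : c1.1.length < f := by
            have := congrArg List.length he1; simp at this; omega
          have hcpos : (0:Int) ≤ (pre1.count '(' : Int) := by positivity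
          have hz2 : 0 ≤ c1.2.2 := by omega
          have hsplit : rest.count '(' = pre1.count '(' + c1.1.count '(' := by
            conv_lhs => rw [he1]
            rw [List.count_append]
          have hb1' := hb1 hemp
          have hbal' : ∀ q ∈ c1.1.inits, q.count ')' ≤ q.count '(' := by
            intro q hq
            rw [List.mem_inits _ _] at hq
            obtain ⟨t, ht⟩ := hq
            have hpre : ('(' :: (pre1 ++ q)) <+: ('('::rest) := by
              refine ⟨t, ?_⟩
              rw [List.cons_append, List.append_assoc, ht, ← he1]
            have := hbal ('(' :: (pre1 ++ q)) ((List.mem_inits _ _).mpr hpre)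
            simp only [List.count_cons, List.count_append] at this
            simp at this
            omega
          have hnew2 : ∀ k : Int, c1.2.2 < k → k ≤ c1.2.2 + (c1.1.count '(' : Int) →
              (c1.2.1.get? k).isSome := by
            intro k hk2a hk2b
            rw [hk1]
            exact hnew k (by omega) (by omega)
          exact ih c1.1 c1.2.1 c1.2.2 hlen2 hz2 hbal' hnew2
      · by_cases hc2 : c = ')'
        · subst hc2
          exfalso
          have hpre : [')'] <+: (')'::rest) := ⟨rest, rfl⟩
          have := hbal [')'] ((List.mem_inits _ _).mpr hpre)
          simp at this
        · rw [parseB_step_other f 0 c rest G z hc1 hc2]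
          have hstepA : stepA_klammern (some (G, ([] : List Int), z)) c = some (G, [], z) := by
            simp [stepA_klammern, hc1, hc2]
          rw [List.foldl_cons, hstepA]
          have hlen : rest.length < f := by simpa using h
          have hcnt : (c::rest).count '(' = rest.count '(' := by simp [hc1]
          have hbal' : ∀ q ∈ rest.inits, q.count ')' ≤ q.count '(' := by
            intro q hq
            rw [List.mem_inits _ _] at hq
            obtain ⟨t, ht⟩ := hq
            have hpre : (c :: q) <+: (c::rest) := ⟨t, by rw [List.cons_append, ht]⟩
            have := hbal (c :: q) ((List.mem_inits _ _).mpr hpre)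
            simp [List.count_cons, hc1, hc2] at this
            exact this
          have hnew' : ∀ k : Int, z < k → k ≤ z + (rest.count '(' : Int) → (G.get? k).isSome := by
            intro k hk1 hk2
            exact hnew k hk1 (by omega)
          exact ih rest G z hlen hz hbal' hnew'

-- every id 1 .. len/2 is a key of the initial dict G0
theorem G0_keys (n : Nat) (k : Int) (h1 : 0 < k) (h2 : k ≤ (n / 2 : Nat)) :
    ((((PySem.List.pyRange 1 (PySem.Int.floordiv (n : Int) 2 + 1) 1).foldl
      (fun d x => d.insert x ([] : List Int)) PySem.Dict.empty) :
        PySem.Dict Int (List Int)).get? k).isSome := by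
  have hfd : PySem.Int.floordiv (n : Int) 2 = ((n / 2 : Nat) : Int) := by
    exact_mod_cast PySem.Int.floordiv_natCast n 2
  rw [← PySem.Dict.contains_eq_isSome_get?]
  rw [PySem.Dict.contains_iff_mem_keys, PySem.Dict.keys_foldl_insert]
  have : k ∈ PySem.List.pyRange 1 (PySem.Int.floordiv (n : Int) 2 + 1) 1 := by
    rw [PySem.List.mem_pyRange_one, hfd]
    omega
  simp only [PySem.Dict.keys_empty]
  exact (PySem.Set.mem_ofList _ _).mpr this

-- ===== VERDICT (by name: the statement is the Claim_ definition above) =====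
theorem klammernToGraph_spec : Claim_equal_klammernToGraph := by
  intro s _hd hpre
  obtain ⟨hbal, hcnt⟩ := hpre
  unfold Spec_klammernToGraph klammernToGraph klammernToGraph_alt
  simp only []
  obtain ⟨T, E⟩ := foldA_parseB_nil (s.toList.length + 1) s.toList
    ((PySem.List.pyRange 1 (PySem.Int.floordiv (s.toList.length : Int) 2 + 1) 1).foldl
      (fun d x => d.insert x ([] : List Int)) PySem.Dict.empty) 0
    (by omega) (by omega) hbal
    (by
      intro k hk1 hk2
      exact G0_keys s.toList.length k hk1 (by omega))
  rw [E]
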